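-- pv_equiv track=rewrite | github.com/NirB94/EfsharHeshbon | backend/core_logic.py | evaluate_board_confusion
-- ===== SOURCE A (Python) =====
-- def find_common_factors(row_target, col_target, valid_digits):
--     """
--     Find common factors between row and column targets that are in valid_digits.
--     Returns smaller factors first to create maximum confusion.
--     """
--     if row_target <= 0 or col_target <= 0:
--         return []
--
--     common_factors = []
--     for n in valid_digits:
--         if row_target % n == 0 and col_target % n == 0:
--             common_factors.append(n)
--
--     # Sort by size (smaller factors first for more confusion)
--     common_factors.sort()
--     return common_factors
--
-- def evaluate_board_confusion(board, row_targets, col_targets, solution_grid, valid_digits):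
--     """
--     Evaluate how confusing a board is based on common factors and potential misleading paths.
--     Returns a confusion score (higher is more confusing).
--     """
--     confusion_score = 0
--     size = len(board)
--
--     # Score based on common factors between row and column targets
--     for row_idx in range(size):
--         for col_idx in range(size):
--             if solution_grid[row_idx][col_idx] == 0:  # Non-marked cell
--                 row_target = row_targets[row_idx]
--                 col_target = col_targets[col_idx]
--                 cell_value = board[row_idx][col_idx]
--
--                 # High score if the cell value is a common factor
--                 common_factors = find_common_factors(row_target, col_target, valid_digits)
--                 if cell_value in common_factors:
--                     confusion_score += 50
--
--                 # Medium score if it's a factor of either target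
--                 if row_target % cell_value == 0 or col_target % cell_value == 0:
--                     confusion_score += 25
--
--     # Bonus for targets with many factors (more potential for confusion)
--     for target in row_targets + col_targets:
--         if target > 0:
--             factors = [n for n in valid_digits if target % n == 0]
--             if len(factors) >= 4:
--                 confusion_score += 30
--             elif len(factors) >= 3:
--                 confusion_score += 15
--
--     return confusion_score
-- ===== SOURCE B (Python) =====
-- def evaluate_board_confusion(board, row_targets, col_targets, solution_grid, valid_digits):
--     # One pass over the targets builds a factor table; the cell loop and the
--     # bonus loop both reuse it instead of re-scanning valid_digits.
--     factors = {}
--     for t in row_targets + col_targets: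
--         if t > 0 and t not in factors:
--             factors[t] = [n for n in valid_digits if t % n == 0]
--
--     score = 0
--     size = len(board)
--     for r in range(size):
--         for c in range(size):
--             if solution_grid[r][c] == 0:
--                 rt = row_targets[r]
--                 ct = col_targets[c]
--                 v = board[r][c]
--                 if rt > 0 and ct > 0 and v in factors[rt] and v in factors[ct]:
--                     score += 50
--                 if rt % v == 0 or ct % v == 0:
--                     score += 25
--
--     for t in row_targets + col_targets:
--         if t > 0:
--             k = len(factors[t])
--             if k >= 4:
--                 score += 30
--             elif k >= 3:
--                 score += 15
--     return score
-- ===== Notes on version B (the rewrite author's own statement) =====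
-- stated objective: alternative
-- what changed: B builds a dict mapping each positive target to its list of valid-digit divisors in one pass, replacing A's per-cell find_common_factors (with its sort) and the bonus loop's per-target rescans with table lookups.
import Mathlib
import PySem

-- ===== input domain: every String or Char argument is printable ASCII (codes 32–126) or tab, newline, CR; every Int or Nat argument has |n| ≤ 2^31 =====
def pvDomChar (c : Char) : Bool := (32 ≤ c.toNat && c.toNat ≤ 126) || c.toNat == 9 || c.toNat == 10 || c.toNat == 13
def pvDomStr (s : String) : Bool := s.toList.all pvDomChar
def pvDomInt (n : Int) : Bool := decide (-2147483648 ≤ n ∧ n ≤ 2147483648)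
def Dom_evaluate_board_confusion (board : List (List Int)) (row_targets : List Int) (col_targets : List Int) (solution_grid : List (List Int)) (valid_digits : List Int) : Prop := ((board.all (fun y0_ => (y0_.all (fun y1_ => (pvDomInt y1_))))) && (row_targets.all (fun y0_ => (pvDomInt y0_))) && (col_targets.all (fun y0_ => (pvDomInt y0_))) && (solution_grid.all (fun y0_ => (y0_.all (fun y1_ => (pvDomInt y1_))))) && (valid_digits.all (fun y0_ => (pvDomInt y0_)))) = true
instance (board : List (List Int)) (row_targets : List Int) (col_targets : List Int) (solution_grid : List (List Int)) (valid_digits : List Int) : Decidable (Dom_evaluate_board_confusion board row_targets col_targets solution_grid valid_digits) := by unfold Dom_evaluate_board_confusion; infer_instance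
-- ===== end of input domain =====

-- B replaces A's per-cell find_common_factors (with its sort) and the bonus loop's
-- rescans of valid_digits by one dict of divisor lists built in a single pass over
-- the targets (objective: alternative decomposition via a precomputed table).

-- ===== PORT A =====
def find_common_factors (row_target : Int) (col_target : Int) (valid_digits : List Int) : List Int :=
  if row_target ≤ 0 ∨ col_target ≤ 0 then []
  else
    let common_factors := valid_digits.foldl
      (fun acc n => if PySem.Int.mod row_target n = 0 ∧ PySem.Int.mod col_target n = 0 then acc ++ [n] else acc) []
    PySem.List.sorted common_factors id false

def evaluate_board_confusion (board : List (List Int)) (row_targets : List Int) (col_targets : List Int) (solution_grid : List (List Int)) (valid_digits : List Int) : Int :=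
  let size : Int := board.length
  let s1 := (PySem.List.pyRange 0 size 1).foldl (fun acc row_idx =>
    (PySem.List.pyRange 0 size 1).foldl (fun acc col_idx =>
      if PySem.List.pyGetD (PySem.List.pyGetD solution_grid row_idx []) col_idx 1 = 0 then
        let row_target := PySem.List.pyGetD row_targets row_idx 0
        let col_target := PySem.List.pyGetD col_targets col_idx 0
        let cell_value := PySem.List.pyGetD (PySem.List.pyGetD board row_idx []) col_idx 0
        let common_factors := find_common_factors row_target col_target valid_digits
        let acc := if cell_value ∈ common_factors then acc + 50 else acc
        if PySem.Int.mod row_target cell_value = 0 ∨ PySem.Int.mod col_target cell_value = 0 then acc + 25 else acc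
      else acc) acc) 0
  (row_targets ++ col_targets).foldl (fun acc target =>
    if 0 < target then
      let factors := valid_digits.filter (fun n => PySem.Int.mod target n == 0)
      if 4 ≤ factors.length then acc + 30
      else if 3 ≤ factors.length then acc + 15
      else acc
    else acc) s1

-- ===== PORT B =====
-- B-side helpers: the divisor list stored for a target, and the dict-building step
def pvF (valid_digits : List Int) (t : Int) : List Int :=
  valid_digits.filter (fun n => PySem.Int.mod t n == 0)

def pvStep (valid_digits : List Int) (d : PySem.Dict Int (List Int)) (t : Int) : PySem.Dict Int (List Int) :=
  if 0 < t ∧ d.contains t = false then d.insert t (pvF valid_digits t) else d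

def evaluate_board_confusion_alt (board : List (List Int)) (row_targets : List Int) (col_targets : List Int) (solution_grid : List (List Int)) (valid_digits : List Int) : Int :=
  let factors : PySem.Dict Int (List Int) :=
    (row_targets ++ col_targets).foldl (pvStep valid_digits) PySem.Dict.empty
  let size : Int := board.length
  let s1 := (PySem.List.pyRange 0 size 1).foldl (fun acc r =>
    (PySem.List.pyRange 0 size 1).foldl (fun acc c =>
      if PySem.List.pyGetD (PySem.List.pyGetD solution_grid r []) c 1 = 0 then
        let rt := PySem.List.pyGetD row_targets r 0
        let ct := PySem.List.pyGetD col_targets c 0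
        let v := PySem.List.pyGetD (PySem.List.pyGetD board r []) c 0
        let acc := if 0 < rt ∧ 0 < ct ∧ v ∈ factors.getD rt [] ∧ v ∈ factors.getD ct [] then acc + 50 else acc
        if PySem.Int.mod rt v = 0 ∨ PySem.Int.mod ct v = 0 then acc + 25 else acc
      else acc) acc) 0
  (row_targets ++ col_targets).foldl (fun acc t =>
    if 0 < t then
      let k := (factors.getD t []).length
      if 4 ≤ k then acc + 30
      else if 3 ≤ k then acc + 15
      else acc
    else acc) s1

-- ===== PRECONDITION & SPEC =====
-- Pre_ excludes exactly the inputs where the Python A raises: IndexError when the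
-- target lists / grids are shorter than the board, ZeroDivisionError when a
-- non-marked cell holds 0, and ZeroDivisionError when 0 is a valid digit and some
-- target is positive.
def Pre_evaluate_board_confusion (board : List (List Int)) (row_targets : List Int) (col_targets : List Int) (solution_grid : List (List Int)) (valid_digits : List Int) : Prop :=
  board.length ≤ row_targets.length ∧
  board.length ≤ col_targets.length ∧
  board.length ≤ solution_grid.length ∧
  (∀ row ∈ board, board.length ≤ row.length) ∧
  (∀ row ∈ solution_grid.take board.length, board.length ≤ row.length) ∧
  (∀ i < board.length, ∀ j < board.length,
      (solution_grid.getD i []).getD j 1 = 0 → (board.getD i []).getD j 0 ≠ 0) ∧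
  ((0 : Int) ∈ valid_digits → ∀ t ∈ row_targets ++ col_targets, t ≤ 0)
instance (board : List (List Int)) (row_targets : List Int) (col_targets : List Int) (solution_grid : List (List Int)) (valid_digits : List Int) : Decidable (Pre_evaluate_board_confusion board row_targets col_targets solution_grid valid_digits) := by unfold Pre_evaluate_board_confusion; infer_instance

def pvWitness_evaluate_board_confusion : List (List Int) × List Int × List Int × List (List Int) × List Int :=
  ([[2, 3], [4, 6]], [6, 12], [12, 6], [[0, 1], [1, 0]], [1, 2, 3, 4])

def Spec_evaluate_board_confusion (board : List (List Int)) (row_targets : List Int) (col_targets : List Int) (solution_grid : List (List Int)) (valid_digits : List Int) (out : Int) : Prop := out = evaluate_board_confusion_alt board row_targets col_targets solution_grid valid_digits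
instance (board : List (List Int)) (row_targets : List Int) (col_targets : List Int) (solution_grid : List (List Int)) (valid_digits : List Int) (out : Int) : Decidable (Spec_evaluate_board_confusion board row_targets col_targets solution_grid valid_digits out) := by unfold Spec_evaluate_board_confusion; infer_instance

-- ===== CLAIM (what is proved, stated in full; the proofs are below) =====
def Claim_equal_evaluate_board_confusion : Prop := ∀ (board : List (List Int)) (row_targets : List Int) (col_targets : List Int) (solution_grid : List (List Int)) (valid_digits : List Int), Dom_evaluate_board_confusion board row_targets col_targets solution_grid valid_digits → Pre_evaluate_board_confusion board row_targets col_targets solution_grid valid_digits → Spec_evaluate_board_confusion board row_targets col_targets solution_grid valid_digits (evaluate_board_confusion board row_targets col_targets solution_grid valid_digits)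

-- ===== LEMMAS AND PROOFS =====

lemma pvBuild_contains (vd : List Int) (l : List Int) (d : PySem.Dict Int (List Int))
    (t : Int) (ht : 0 < t) (h : t ∈ l ∨ d.contains t = true) :
    (l.foldl (pvStep vd) d).contains t = true := by
  induction l generalizing d with
  | nil => simpa using h.resolve_left (by simp)
  | cons x xs ih =>
    simp only [List.foldl_cons]
    apply ih
    rcases h with h | h
    · rcases List.mem_cons.1 h with rfl | h
      · right
        unfold pvStep
        split
        · simp [PySem.Dict.contains_insert_self]
        · rename_i hc
          rcases Decidable.em (d.contains t = true) with h' | h'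
          · exact h'
          · exact absurd ⟨ht, by simpa using h'⟩ hc
      · exact Or.inl h
    · right
      unfold pvStep
      split
      · simp [PySem.Dict.contains_insert, h]
      · exact h

lemma pvBuild_getD (vd : List Int) (l : List Int) (d : PySem.Dict Int (List Int))
    (hinv : ∀ s, d.contains s = true → d.getD s [] = pvF vd s) :
    ∀ s, (l.foldl (pvStep vd) d).contains s = true →
      (l.foldl (pvStep vd) d).getD s [] = pvF vd s := by
  induction l generalizing d with
  | nil => simpa using hinv
  | cons x xs ih =>
    simp only [List.foldl_cons]
    apply ih
    intro s hs
    unfold pvStep at hs ⊢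
    by_cases hc : 0 < x ∧ d.contains x = false
    · rw [if_pos hc] at hs ⊢
      rcases Decidable.em (s = x) with rfl | hne
      · simp [PySem.Dict.getD_insert_self]
      · rw [PySem.Dict.getD_insert_of_ne _ _ _ hne]
        apply hinv
        simpa [PySem.Dict.contains_insert, hne] using hs
    · rw [if_neg hc] at hs ⊢
      exact hinv s hs

-- combined: any positive target occurring in the list is mapped to its divisor list
lemma pvBuild_lookup (vd : List Int) (l : List Int) (t : Int) (ht : 0 < t) (hmem : t ∈ l) :
    (l.foldl (pvStep vd) PySem.Dict.empty).getD t [] = pvF vd t := by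
  apply pvBuild_getD vd l PySem.Dict.empty
  · intro s hs; simp [PySem.Dict.contains, PySem.Dict.empty] at hs
  · exact pvBuild_contains vd l _ t ht (Or.inl hmem)

-- membership in A's common-factor list, characterised
lemma pvMem_fcf (rt ct v : Int) (vd : List Int) :
    v ∈ find_common_factors rt ct vd ↔
      (0 < rt ∧ 0 < ct ∧ v ∈ pvF vd rt ∧ v ∈ pvF vd ct) := by
  unfold find_common_factors
  split
  · rename_i h
    simp only [List.not_mem_nil, false_iff]
    rintro ⟨h1, h2, -⟩
    rcases h with h | h <;> omega
  · rename_i h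
    push Not at h
    rw [PySem.List.mem_sorted,
        show (fun (acc : List Int) n => if PySem.Int.mod rt n = 0 ∧ PySem.Int.mod ct n = 0 then acc ++ [n] else acc)
           = (fun acc n => if (decide (PySem.Int.mod rt n = 0 ∧ PySem.Int.mod ct n = 0)) = true then acc ++ [id n] else acc)
          from by funext acc n; simp,
        PySem.List.foldl_append_if]
    simp only [List.map_id, List.nil_append, List.mem_filter, pvF, decide_eq_true_eq]
    constructor
    · rintro ⟨hm, h1, h2⟩
      exact ⟨by omega, by omega, ⟨hm, by simpa using h1⟩, ⟨hm, by simpa using h2⟩⟩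
    · rintro ⟨-, -, ⟨hm, h1⟩, ⟨-, h2⟩⟩
      exact ⟨hm, by simpa using h1, by simpa using h2⟩

-- ===== VERDICT (by name: the statement is the Claim_ definition above) =====
theorem evaluate_board_confusion_spec : Claim_equal_evaluate_board_confusion := by
  intro board row_targets col_targets solution_grid valid_digits _ hpre
  obtain ⟨hr, hc, -, -, -, -, -⟩ := hpre
  unfold Spec_evaluate_board_confusion
  simp only [evaluate_board_confusion, evaluate_board_confusion_alt]
  have hlook : ∀ t ∈ row_targets ++ col_targets, 0 < t →
      ((row_targets ++ col_targets).foldl (pvStep valid_digits) PySem.Dict.empty).getD t []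
        = pvF valid_digits t :=
    fun t hm ht => pvBuild_lookup valid_digits _ t ht hm
  have hcell :
      (PySem.List.pyRange 0 (board.length : Int) 1).foldl (fun acc row_idx =>
        (PySem.List.pyRange 0 (board.length : Int) 1).foldl (fun acc col_idx =>
          if PySem.List.pyGetD (PySem.List.pyGetD solution_grid row_idx []) col_idx 1 = 0 then
            if PySem.Int.mod (PySem.List.pyGetD row_targets row_idx 0) (PySem.List.pyGetD (PySem.List.pyGetD board row_idx []) col_idx 0) = 0 ∨
               PySem.Int.mod (PySem.List.pyGetD col_targets col_idx 0) (PySem.List.pyGetD (PySem.List.pyGetD board row_idx []) col_idx 0) = 0 then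
              (if PySem.List.pyGetD (PySem.List.pyGetD board row_idx []) col_idx 0 ∈
                  find_common_factors (PySem.List.pyGetD row_targets row_idx 0) (PySem.List.pyGetD col_targets col_idx 0) valid_digits
               then acc + 50 else acc) + 25
            else
              (if PySem.List.pyGetD (PySem.List.pyGetD board row_idx []) col_idx 0 ∈
                  find_common_factors (PySem.List.pyGetD row_targets row_idx 0) (PySem.List.pyGetD col_targets col_idx 0) valid_digits
               then acc + 50 else acc)
          else acc) acc) (0 : Int)
      =
      (PySem.List.pyRange 0 (board.length : Int) 1).foldl (fun acc r =>
        (PySem.List.pyRange 0 (board.length : Int) 1).foldl (fun acc c =>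
          if PySem.List.pyGetD (PySem.List.pyGetD solution_grid r []) c 1 = 0 then
            if PySem.Int.mod (PySem.List.pyGetD row_targets r 0) (PySem.List.pyGetD (PySem.List.pyGetD board r []) c 0) = 0 ∨
               PySem.Int.mod (PySem.List.pyGetD col_targets c 0) (PySem.List.pyGetD (PySem.List.pyGetD board r []) c 0) = 0 then
              (if 0 < PySem.List.pyGetD row_targets r 0 ∧ 0 < PySem.List.pyGetD col_targets c 0 ∧
                  PySem.List.pyGetD (PySem.List.pyGetD board r []) c 0 ∈
                    ((row_targets ++ col_targets).foldl (pvStep valid_digits) PySem.Dict.empty).getD (PySem.List.pyGetD row_targets r 0) [] ∧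
                  PySem.List.pyGetD (PySem.List.pyGetD board r []) c 0 ∈
                    ((row_targets ++ col_targets).foldl (pvStep valid_digits) PySem.Dict.empty).getD (PySem.List.pyGetD col_targets c 0) []
               then acc + 50 else acc) + 25
            else
              (if 0 < PySem.List.pyGetD row_targets r 0 ∧ 0 < PySem.List.pyGetD col_targets c 0 ∧
                  PySem.List.pyGetD (PySem.List.pyGetD board r []) c 0 ∈
                    ((row_targets ++ col_targets).foldl (pvStep valid_digits) PySem.Dict.empty).getD (PySem.List.pyGetD row_targets r 0) [] ∧
                  PySem.List.pyGetD (PySem.List.pyGetD board r []) c 0 ∈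
                    ((row_targets ++ col_targets).foldl (pvStep valid_digits) PySem.Dict.empty).getD (PySem.List.pyGetD col_targets c 0) []
               then acc + 50 else acc)
          else acc) acc) (0 : Int) := by
    apply PySem.List.foldl_congr_mem
    intro acc ri hri
    apply PySem.List.foldl_congr_mem
    intro acc2 ci hci
    rw [PySem.List.mem_pyRange_one] at hri hci
    by_cases hsg : PySem.List.pyGetD (PySem.List.pyGetD solution_grid ri []) ci 1 = 0
    case neg => rw [if_neg hsg, if_neg hsg]
    case pos =>
      rw [if_pos hsg, if_pos hsg]
      have hrtmem : PySem.List.pyGetD row_targets ri 0 ∈ row_targets ++ col_targets :=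
        List.mem_append_left _ (PySem.List.pyGetD_mem row_targets 0 (by unfold PySem.Raise.InRange; omega))
      have hctmem : PySem.List.pyGetD col_targets ci 0 ∈ row_targets ++ col_targets :=
        List.mem_append_right _ (PySem.List.pyGetD_mem col_targets 0 (by unfold PySem.Raise.InRange; omega))
      have hcond :
          (PySem.List.pyGetD (PySem.List.pyGetD board ri []) ci 0 ∈
              find_common_factors (PySem.List.pyGetD row_targets ri 0) (PySem.List.pyGetD col_targets ci 0) valid_digits)
          ↔ (0 < PySem.List.pyGetD row_targets ri 0 ∧ 0 < PySem.List.pyGetD col_targets ci 0 ∧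
              PySem.List.pyGetD (PySem.List.pyGetD board ri []) ci 0 ∈
                ((row_targets ++ col_targets).foldl (pvStep valid_digits) PySem.Dict.empty).getD (PySem.List.pyGetD row_targets ri 0) [] ∧
              PySem.List.pyGetD (PySem.List.pyGetD board ri []) ci 0 ∈
                ((row_targets ++ col_targets).foldl (pvStep valid_digits) PySem.Dict.empty).getD (PySem.List.pyGetD col_targets ci 0) []) := by
        rw [pvMem_fcf]
        constructor
        · rintro ⟨h1, h2, h3, h4⟩
          exact ⟨h1, h2, by rw [hlook _ hrtmem h1]; exact h3, by rw [hlook _ hctmem h2]; exact h4⟩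
        · rintro ⟨h1, h2, h3, h4⟩
          exact ⟨h1, h2, by rwa [hlook _ hrtmem h1] at h3, by rwa [hlook _ hctmem h2] at h4⟩
      simp only [hcond]
  rw [hcell]
  apply PySem.List.foldl_congr_mem
  intro acc t hmem
  by_cases ht : 0 < t
  · rw [if_pos ht, if_pos ht, hlook t hmem ht]
    rfl
  · rw [if_neg ht, if_neg ht]
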